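-- pv_equiv track=rewrite | github.com/BoyRush/TA-Keteknowiraan | backend/services/llm_generator.py | _sinonim_match
-- ===== SOURCE A (Python) =====
-- SINONIM_MEDIS = {
--     "hipertensi": ["hipertensi", "tekanan darah tinggi", "darah tinggi", "hypertension", "htn"],
--     "diabetes": ["diabetes", "kencing manis", "gula darah tinggi", "dm", "diabetes mellitus", "hiperglikemia"],
--     "gagal ginjal": ["gagal ginjal", "ginjal", "renal failure", "ckd", "penyakit ginjal"],
--     "hepatitis": ["hepatitis", "liver", "hati", "hati meradang"],
--     "ibu hamil": ["hamil", "kehamilan", "pregnant", "ibu hamil", "gestasi"],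
--     "anak-anak": ["anak", "bayi", "balita", "anak-anak", "pediatric"],
--     "pendarahan": ["pendarahan", "bleeding", "antikoagulan", "pengencer darah"],
--     "alergi": ["alergi", "hipersensitif", "reaksi alergi"],
--     "maag": ["maag", "gastritis", "asam lambung", "gerd", "ulkus lambung"],
--     "asma": ["asma", "asthma", "sesak napas", "bronkospasme"],
-- }
--
-- def _sinonim_match(term1: str, term2: str) -> bool:
--     """
--     Cek apakah dua istilah medis adalah sinonim menggunakan kamus lokal.
--     Fallback ketika AI tidak tersedia.
--     """
--     t1 = term1.lower().strip()
--     t2 = term2.lower().strip()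
--
--     if t1 == t2:
--         return True
--     if t1 in t2 or t2 in t1:
--         return True
--
--     # Cek kamus sinonim
--     for key, variants in SINONIM_MEDIS.items():
--         in_t1 = any(v in t1 for v in variants)
--         in_t2 = any(v in t2 for v in variants)
--         if in_t1 and in_t2:
--             return True
--
--     return False
-- ===== SOURCE B (Python) =====
-- SINONIM_MEDIS = {
--     "hipertensi": ["hipertensi", "tekanan darah tinggi", "darah tinggi", "hypertension", "htn"],
--     "diabetes": ["diabetes", "kencing manis", "gula darah tinggi", "dm", "diabetes mellitus", "hiperglikemia"],
--     "gagal ginjal": ["gagal ginjal", "ginjal", "renal failure", "ckd", "penyakit ginjal"],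
--     "hepatitis": ["hepatitis", "liver", "hati", "hati meradang"],
--     "ibu hamil": ["hamil", "kehamilan", "pregnant", "ibu hamil", "gestasi"],
--     "anak-anak": ["anak", "bayi", "balita", "anak-anak", "pediatric"],
--     "pendarahan": ["pendarahan", "bleeding", "antikoagulan", "pengencer darah"],
--     "alergi": ["alergi", "hipersensitif", "reaksi alergi"],
--     "maag": ["maag", "gastritis", "asam lambung", "gerd", "ulkus lambung"],
--     "asma": ["asma", "asthma", "sesak napas", "bronkospasme"],
-- }
--
-- # Flat relation built once: all ordered pairs of variants that belong to the same
-- # synonym group.  Two terms are dictionary-synonyms iff some pair (v1, v2) of this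
-- # relation has v1 occurring in term1 and v2 in term2 -- the group keys disappear.
-- _SYN_PAIRS = [
--     (v1, v2)
--     for variants in SINONIM_MEDIS.values()
--     for v1 in variants
--     for v2 in variants
-- ]
--
--
-- def _sinonim_match(term1: str, term2: str) -> bool:
--     t1 = term1.lower().strip()
--     t2 = term2.lower().strip()
--
--     if t1 == t2:
--         return True
--     if t1 in t2 or t2 in t1:
--         return True
--
--     return any(v1 in t1 and v2 in t2 for v1, v2 in _SYN_PAIRS)
-- ===== Notes on version B (the rewrite author's own statement) =====
-- stated objective: alternative
-- what changed: The per-group loop that tests each term against a group's variant list is replaced by a precomputed flat relation of same-group variant pairs, and the dictionary phase becomes a single any() over that pair relation; group keys and per-term match computation disappear.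
import Mathlib
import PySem

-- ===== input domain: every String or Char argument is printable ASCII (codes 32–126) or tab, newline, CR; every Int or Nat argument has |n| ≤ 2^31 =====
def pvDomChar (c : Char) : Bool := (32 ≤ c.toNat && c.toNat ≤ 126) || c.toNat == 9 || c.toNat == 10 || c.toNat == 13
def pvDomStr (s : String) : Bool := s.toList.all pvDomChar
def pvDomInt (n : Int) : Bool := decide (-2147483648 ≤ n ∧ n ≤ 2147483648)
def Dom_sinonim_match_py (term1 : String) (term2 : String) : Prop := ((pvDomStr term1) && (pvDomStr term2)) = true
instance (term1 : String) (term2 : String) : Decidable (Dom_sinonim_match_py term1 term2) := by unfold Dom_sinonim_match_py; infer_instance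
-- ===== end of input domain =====

-- B replaces A's per-group dictionary loop by a precomputed flat relation of
-- same-group variant pairs tested with a single any() (objective: alternative).

-- the module constant SINONIM_MEDIS (shared data, used by both ports)
def pvSinonim : List (String × List String) :=
  [ ("hipertensi", ["hipertensi", "tekanan darah tinggi", "darah tinggi", "hypertension", "htn"]),
    ("diabetes", ["diabetes", "kencing manis", "gula darah tinggi", "dm", "diabetes mellitus", "hiperglikemia"]),
    ("gagal ginjal", ["gagal ginjal", "ginjal", "renal failure", "ckd", "penyakit ginjal"]),
    ("hepatitis", ["hepatitis", "liver", "hati", "hati meradang"]),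
    ("ibu hamil", ["hamil", "kehamilan", "pregnant", "ibu hamil", "gestasi"]),
    ("anak-anak", ["anak", "bayi", "balita", "anak-anak", "pediatric"]),
    ("pendarahan", ["pendarahan", "bleeding", "antikoagulan", "pengencer darah"]),
    ("alergi", ["alergi", "hipersensitif", "reaksi alergi"]),
    ("maag", ["maag", "gastritis", "asam lambung", "gerd", "ulkus lambung"]),
    ("asma", ["asma", "asthma", "sesak napas", "bronkospasme"]) ]

-- ===== PORT A =====
-- A's for-loop over the dict items, with the short-circuit 'return True'
def sinonimLoopA : List (String × List String) → String → String → Bool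
  | [], _, _ => false
  | (_, variants) :: rest, t1, t2 =>
    let in_t1 := variants.any (fun v => PySem.Str.isIn v t1)
    let in_t2 := variants.any (fun v => PySem.Str.isIn v t2)
    if in_t1 && in_t2 then true else sinonimLoopA rest t1 t2

def sinonim_match_py (term1 : String) (term2 : String) : Bool :=
  let t1 := PySem.Str.strip (PySem.Str.lower term1)
  let t2 := PySem.Str.strip (PySem.Str.lower term2)
  if t1 == t2 then true
  else if PySem.Str.isIn t1 t2 || PySem.Str.isIn t2 t1 then true
  else sinonimLoopA pvSinonim t1 t2

-- ===== PORT B =====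
-- B's module-level _SYN_PAIRS: all ordered pairs of variants from the same group
def pvSynPairs : List (String × String) :=
  pvSinonim.flatMap (fun kv => kv.2.flatMap (fun v1 => kv.2.map (fun v2 => (v1, v2))))

def sinonim_match_py_alt (term1 : String) (term2 : String) : Bool :=
  let t1 := PySem.Str.strip (PySem.Str.lower term1)
  let t2 := PySem.Str.strip (PySem.Str.lower term2)
  if t1 == t2 then true
  else if PySem.Str.isIn t1 t2 || PySem.Str.isIn t2 t1 then true
  else pvSynPairs.any (fun p => PySem.Str.isIn p.1 t1 && PySem.Str.isIn p.2 t2)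

-- ===== PRECONDITION & SPEC =====
def Spec_sinonim_match_py (term1 : String) (term2 : String) (out : Bool) : Prop := out = sinonim_match_py_alt term1 term2
instance (term1 : String) (term2 : String) (out : Bool) : Decidable (Spec_sinonim_match_py term1 term2 out) := by unfold Spec_sinonim_match_py; infer_instance

-- ===== CLAIM (what is proved, stated in full; the proofs are below) =====
def Claim_equal_sinonim_match_py : Prop := ∀ (term1 : String) (term2 : String), Dom_sinonim_match_py term1 term2 → Spec_sinonim_match_py term1 term2 (sinonim_match_py term1 term2)

-- ===== LEMMAS AND PROOFS =====

theorem sinonimLoopA_eq_any (L : List (String × List String)) (t1 t2 : String) :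
    sinonimLoopA L t1 t2
      = L.any (fun kv => kv.2.any (fun v => PySem.Str.isIn v t1)
                         && kv.2.any (fun v => PySem.Str.isIn v t2)) := by
  induction L with
  | nil => rfl
  | cons kv rest ih =>
    obtain ⟨k, vs⟩ := kv
    simp only [sinonimLoopA, List.any_cons, ih]
    split_ifs with h
    · simp only [h, Bool.true_or]
    · rw [Bool.eq_false_iff.mpr h, Bool.false_or]

-- a group has a variant in t1 and a variant in t2  ⟺  some same-group pair matches
theorem pairs_any_eq_loop (t1 t2 : String) :
    pvSynPairs.any (fun p => PySem.Str.isIn p.1 t1 && PySem.Str.isIn p.2 t2)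
      = sinonimLoopA pvSinonim t1 t2 := by
  rw [sinonimLoopA_eq_any, Bool.eq_iff_iff]
  simp only [pvSynPairs, List.any_flatMap, List.any_map, List.any_eq_true, Function.comp, Bool.and_eq_true]
  tauto

-- ===== VERDICT (by name: the statement is the Claim_ definition above) =====
theorem sinonim_match_py_spec : Claim_equal_sinonim_match_py := by
  intro term1 term2 _
  unfold Spec_sinonim_match_py sinonim_match_py sinonim_match_py_alt
  simp only [pairs_any_eq_loop]
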